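-- pv_equiv track=rewrite | github.com/golthitarun/Morris-Game---Varient-B | MorrisGame.py | possibleMillCount
-- ===== SOURCE A (Python) =====
-- def closeMill(location, board):
--     """
--     :param location: a location j in the array representing the board.
--     :param board: the board b.
--     :return: true if the move to j closes a mill.
--     """
--     C = board[location]
--     mill = {
--         0: (board[6] == C and board[18] == C) or (board[2] == C and board[4] == C),
--         6: (board[7] == C and board[8] == C) or (board[0] == C and board[18] == C),
--         18: (board[0] == C and board[6] == C) or (board[19] == C and board[20] == C),
--         2: (board[0] == C and board[4] == C) or (board[7] == C and board[15] == C),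
--         7: (board[2] == C and board[15] == C) or (board[6] == C and board[8] == C),
--         15: (board[2] == C and board[7] == C) or (board[16] == C and board[17] == C),
--         4: (board[2] == C and board[0] == C) or (board[8] == C and board[12] == C),
--         8: (board[4] == C and board[12] == C) or (board[6] == C and board[7] == C),
--         12: (board[8] == C and board[4] == C) or (board[13] == C and board[14] == C),
--         13: (board[12] == C and board[14] == C) or (board[16] == C and board[19] == C),
--         16: (board[13] == C and board[19] == C) or (board[15] == C and board[17] == C),
--         19: (board[16] == C and board[13] == C) or (board[18] == C and board[20] == C),
--         5: (board[9] == C and board[14] == C),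
--         9: (board[5] == C and board[14] == C) or (board[10] == C and board[11] == C),
--         14: (board[9] == C and board[5] == C) or (board[12] == C and board[13] == C),
--         3: (board[10] == C and board[17] == C),
--         10: (board[3] == C and board[17] == C) or (board[9] == C and board[11] == C),
--         17: (board[3] == C and board[10] == C) or (board[15] == C and board[16] == C),
--         1: (board[11] == C and board[20] == C),
--         11: (board[1] == C and board[20] == C) or (board[9] == C and board[10] == C),
--         20: (board[1] == C and board[11] == C) or (board[18] == C and board[19] == C),
--     }[location]
--
--     return mill
--
-- def possibleMillCount(board, player):
--     """
--     :param board: a board position.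
--     :return:
--     """
--     count = 0
--
--     for i in range(len(board)):
--         if board[i] == "x":
--             board[i] = player
--             if closeMill(i, board):
--                 count += 1
--             board[i] = "x"
--     return count
-- ===== SOURCE B (Python) =====
-- # All mill triples of the board, derived once; replaces A's per-location
-- # hardcoded dict and the mutate/restore trick with a pure table scan.
-- MILLS = [
--     (0, 2, 4), (0, 6, 18), (1, 11, 20), (2, 7, 15), (3, 10, 17),
--     (4, 8, 12), (5, 9, 14), (6, 7, 8), (9, 10, 11), (12, 13, 14),
--     (13, 16, 19), (15, 16, 17), (18, 19, 20),
-- ]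
--
--
-- def possibleMillCount(board, player):
--     return sum(
--         1
--         for i in range(len(board))
--         if board[i] == "x"
--         and any(
--             i in m and all(board[q] == player for q in m if q != i)
--             for m in MILLS
--         )
--     )
-- ===== Notes on version B (the rewrite author's own statement) =====
-- stated objective: simpler
-- what changed: Replaces the 21-entry hardcoded per-location dict (whose literal evaluates all 42 conditions every call) and the mutate/check/restore loop with one module-level table of the 13 mill triples scanned by any/all, with no board mutation.
import Mathlib
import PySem

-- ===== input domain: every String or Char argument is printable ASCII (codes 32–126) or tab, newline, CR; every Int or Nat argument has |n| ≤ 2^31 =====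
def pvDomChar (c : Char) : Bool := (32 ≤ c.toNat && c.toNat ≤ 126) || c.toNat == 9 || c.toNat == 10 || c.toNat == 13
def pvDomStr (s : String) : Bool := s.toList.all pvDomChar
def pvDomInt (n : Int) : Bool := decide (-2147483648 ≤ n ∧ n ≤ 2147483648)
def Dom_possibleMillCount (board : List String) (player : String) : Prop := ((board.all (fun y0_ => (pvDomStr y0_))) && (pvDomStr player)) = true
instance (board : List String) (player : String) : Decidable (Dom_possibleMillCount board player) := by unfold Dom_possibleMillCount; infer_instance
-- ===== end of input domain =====

-- B replaces A's 21-entry hardcoded dict and mutate/restore loop with one table of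
-- 13 mill triples scanned with any/all, without mutating the board (A restores its
-- in-place change, so A has no net side effect either). Objective: simpler.

-- ===== PORT A =====
-- board[j] for the nonnegative literal indices of closeMill; Python raises IndexError
-- out of range (excluded by Pre_), the "" default is junk only reachable outside Pre_.
def closeMillA (location : Nat) (board : List String) : Bool :=
  let C := board.getD location ""
  let g : Nat → String := fun j => board.getD j ""
  -- the dict literal, looked up at `location`; a location outside the 21 keys is a
  -- Python KeyError (excluded by Pre_), `false` below is junk only reachable there.
  if location = 0 then (g 6 == C && g 18 == C) || (g 2 == C && g 4 == C)
  else if location = 6 then (g 7 == C && g 8 == C) || (g 0 == C && g 18 == C)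
  else if location = 18 then (g 0 == C && g 6 == C) || (g 19 == C && g 20 == C)
  else if location = 2 then (g 0 == C && g 4 == C) || (g 7 == C && g 15 == C)
  else if location = 7 then (g 2 == C && g 15 == C) || (g 6 == C && g 8 == C)
  else if location = 15 then (g 2 == C && g 7 == C) || (g 16 == C && g 17 == C)
  else if location = 4 then (g 2 == C && g 0 == C) || (g 8 == C && g 12 == C)
  else if location = 8 then (g 4 == C && g 12 == C) || (g 6 == C && g 7 == C)
  else if location = 12 then (g 8 == C && g 4 == C) || (g 13 == C && g 14 == C)
  else if location = 13 then (g 12 == C && g 14 == C) || (g 16 == C && g 19 == C)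
  else if location = 16 then (g 13 == C && g 19 == C) || (g 15 == C && g 17 == C)
  else if location = 19 then (g 16 == C && g 13 == C) || (g 18 == C && g 20 == C)
  else if location = 5 then (g 9 == C && g 14 == C)
  else if location = 9 then (g 5 == C && g 14 == C) || (g 10 == C && g 11 == C)
  else if location = 14 then (g 9 == C && g 5 == C) || (g 12 == C && g 13 == C)
  else if location = 3 then (g 10 == C && g 17 == C)
  else if location = 10 then (g 3 == C && g 17 == C) || (g 9 == C && g 11 == C)
  else if location = 17 then (g 3 == C && g 10 == C) || (g 15 == C && g 16 == C)
  else if location = 1 then (g 11 == C && g 20 == C)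
  else if location = 11 then (g 1 == C && g 20 == C) || (g 9 == C && g 10 == C)
  else if location = 20 then (g 1 == C && g 11 == C) || (g 18 == C && g 19 == C)
  else false

-- A mutates board[i] and restores it; ported as `board.set i player` on a copy
-- (net effect on the caller's list is nil, since A always restores "x").
def possibleMillCount (board : List String) (player : String) : Int :=
  (List.range board.length).foldl
    (fun count i =>
      if board.getD i "" == "x" then
        if closeMillA i (board.set i player) then count + 1 else count
      else count)
    0

-- ===== PORT B =====
def MILLS : List (Nat × Nat × Nat) :=
  [(0, 2, 4), (0, 6, 18), (1, 11, 20), (2, 7, 15), (3, 10, 17),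
   (4, 8, 12), (5, 9, 14), (6, 7, 8), (9, 10, 11), (12, 13, 14),
   (13, 16, 19), (15, 16, 17), (18, 19, 20)]

-- `any(i in m and all(board[q] == player for q in m if q != i) for m in MILLS)`
def millCloses (board : List String) (player : String) (i : Nat) : Bool :=
  MILLS.any (fun m =>
    (i == m.1 || i == m.2.1 || i == m.2.2) &&
    ((m.1 == i || board.getD m.1 "" == player) &&
     (m.2.1 == i || board.getD m.2.1 "" == player) &&
     (m.2.2 == i || board.getD m.2.2 "" == player)))

def possibleMillCount_alt (board : List String) (player : String) : Int :=
  (((List.range board.length).filter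
      (fun i => board.getD i "" == "x" && millCloses board player i)).length : Int)

-- ===== PRECONDITION & SPEC =====
-- Pre_ excludes exactly the inputs where A raises: with any "x" present the dict
-- literal reads board[0..20] (IndexError if the board is shorter than 21), and the
-- loop reaches closeMill with a key ≥ 21 (KeyError) when an "x" sits past index 20.
def Pre_possibleMillCount (board : List String) (player : String) : Prop :=
  ("x" ∈ board → 21 ≤ board.length) ∧ "x" ∉ board.drop 21
instance (board : List String) (player : String) : Decidable (Pre_possibleMillCount board player) := by
  unfold Pre_possibleMillCount; infer_instance

def pvWitness_possibleMillCount : List String × String := (List.replicate 21 "x", "W")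

def Spec_possibleMillCount (board : List String) (player : String) (out : Int) : Prop := out = possibleMillCount_alt board player
instance (board : List String) (player : String) (out : Int) : Decidable (Spec_possibleMillCount board player out) := by unfold Spec_possibleMillCount; infer_instance

-- ===== CLAIM (what is proved, stated in full; the proofs are below) =====
def Claim_equal_possibleMillCount : Prop := ∀ (board : List String) (player : String), Dom_possibleMillCount board player → Pre_possibleMillCount board player → Spec_possibleMillCount board player (possibleMillCount board player)

-- ===== LEMMAS AND PROOFS =====

-- pointwise: on a board of length ≥ 21 and a location < 21, A's dict entry after
-- placing `player` at i agrees with B's scan of the mill table.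
lemma close_eq_mill (board : List String) (player : String)
    (hlen : 21 ≤ board.length) (i : Nat) (hi : i < 21) :
    closeMillA i (board.set i player) = millCloses board player i := by
  interval_cases i <;>
  · simp only [closeMillA, millCloses, MILLS, List.any_cons, List.any_nil,
      List.getD_eq_getElem?_getD, List.getElem?_set]
    simp [show (0:Nat) < board.length by omega, show (1:Nat) < board.length by omega, show (2:Nat) < board.length by omega, show (3:Nat) < board.length by omega, show (4:Nat) < board.length by omega, show (5:Nat) < board.length by omega, show (6:Nat) < board.length by omega, show (7:Nat) < board.length by omega, show (8:Nat) < board.length by omega, show (9:Nat) < board.length by omega, show (10:Nat) < board.length by omega, show (11:Nat) < board.length by omega, show (12:Nat) < board.length by omega, show (13:Nat) < board.length by omega, show (14:Nat) < board.length by omega, show (15:Nat) < board.length by omega, show (16:Nat) < board.length by omega, show (17:Nat) < board.length by omega, show (18:Nat) < board.length by omega, show (19:Nat) < board.length by omega, show (20:Nat) < board.length by omega]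
    all_goals (rw [Bool.eq_iff_iff]; simp; tauto)

lemma foldl_count_int (f : Nat → Bool) (l : List Nat) (c : Int) :
    l.foldl (fun count i => if f i then count + 1 else count) c
      = c + ((l.filter f).length : Int) := by
  induction l generalizing c with
  | nil => simp
  | cons x xs ih =>
      by_cases h : f x <;> simp [h, ih] <;> ring

-- ===== VERDICT (by name: the statement is the Claim_ definition above) =====
theorem possibleMillCount_spec : Claim_equal_possibleMillCount := by
  intro board player _ hpre
  unfold Spec_possibleMillCount possibleMillCount possibleMillCount_alt
  rw [PySem.List.foldl_congr_mem
        (l := List.range board.length) (init := (0 : Int))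
        (f := fun count i =>
          if board.getD i "" == "x" then
            if closeMillA i (board.set i player) then count + 1 else count
          else count)
        (g := fun count i =>
          if (board.getD i "" == "x" && millCloses board player i) then count + 1 else count)
        (by
          intro c i hi
          rw [List.mem_range] at hi
          by_cases hx : board.getD i "" = "x"
          · have hmem : "x" ∈ board := by
              rw [List.getD_eq_getElem board "" hi] at hx
              exact hx ▸ List.getElem_mem hi
            have h21 : 21 ≤ board.length := hpre.1 hmem
            have hi21 : i < 21 := by
              by_contra hge
              apply hpre.2
              have hlt : i - 21 < (board.drop 21).length := by
                simp; omega
              have hgoal : (board.drop 21)[i - 21]'hlt = "x" := by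
                rw [List.getD_eq_getElem board "" hi] at hx
                simp only [List.getElem_drop, Nat.add_sub_cancel' (show 21 ≤ i by omega)]
                exact hx
              exact hgoal ▸ List.getElem_mem hlt
            simp only [close_eq_mill board player h21 i hi21]
            rw [List.getD_eq_getElem?_getD] at hx
            simp [hx]
          · rw [List.getD_eq_getElem?_getD] at hx
            simp [hx])]
  rw [foldl_count_int]
  simp
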